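-- pv_equiv track=rewrite | github.com/jsnider3/LanguageGames | CodeBreaker/scoring.py | calculate_puzzle_score
-- ===== SOURCE A (Python) =====
-- def calculate_puzzle_score(base_score: int, hints_used: int, time_taken: int = 0) -> int:
--     """Calculate final score for a puzzle."""
--     score = base_score
--
--     # Hint penalties
--     hint_penalties = [5, 10, 15, 20, 25]
--     for i in range(hints_used):
--         if i < len(hint_penalties):
--             score -= hint_penalties[i]
--         else:
--             score -= 30
--
--     # Time bonus (if under 5 minutes)
--     if time_taken > 0 and time_taken < 300:
--         score += 10
--
--     return max(score, 0)
-- ===== SOURCE B (Python) =====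
-- def calculate_puzzle_score(base_score: int, hints_used: int, time_taken: int = 0) -> int:
--     """Closed-form score: triangular hint penalty up to 5 hints, then flat 30 each."""
--     k = max(0, hints_used)
--     penalty = 5 * k * (k + 1) // 2 if k <= 5 else 75 + 30 * (k - 5)
--     score = base_score - penalty
--     if 0 < time_taken < 300:
--         score += 10
--     return max(score, 0)
-- ===== Notes on version B (the rewrite author's own statement) =====
-- stated objective: faster
-- what changed: Replaces the per-hint penalty loop with a closed-form arithmetic penalty (triangular sum for up to 5 hints, linear beyond), keeping the time bonus and final clamp unchanged.
import Mathlib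
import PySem

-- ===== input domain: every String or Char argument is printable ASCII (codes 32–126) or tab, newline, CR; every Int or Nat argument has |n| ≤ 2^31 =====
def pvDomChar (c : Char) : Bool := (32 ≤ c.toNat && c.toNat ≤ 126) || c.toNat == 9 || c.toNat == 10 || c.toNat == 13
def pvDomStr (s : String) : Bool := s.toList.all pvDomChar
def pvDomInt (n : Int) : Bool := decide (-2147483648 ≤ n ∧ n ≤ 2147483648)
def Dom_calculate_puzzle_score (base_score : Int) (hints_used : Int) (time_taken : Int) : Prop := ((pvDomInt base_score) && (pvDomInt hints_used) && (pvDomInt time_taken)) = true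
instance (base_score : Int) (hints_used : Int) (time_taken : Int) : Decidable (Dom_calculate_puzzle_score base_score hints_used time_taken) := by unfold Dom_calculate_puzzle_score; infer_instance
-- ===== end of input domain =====

-- B replaces A's per-hint penalty loop by a closed-form penalty (triangular to 5 hints, linear after); measured faster (O(1) vs O(hints_used)).


-- ===== PORT A =====
-- hint_penalties = [5, 10, 15, 20, 25]
def pvHintPenalties : List Int := [5, 10, 15, 20, 25]
-- loop body: if i < len(hint_penalties): score -= hint_penalties[i] else: score -= 30
-- (pyGetD is exact here: the branch guarantees 0 ≤ i < len(hint_penalties))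
def pvStepA (score : Int) (i : Int) : Int :=
  if i < (pvHintPenalties.length : Int) then score - PySem.List.pyGetD pvHintPenalties i 0
  else score - 30

def calculate_puzzle_score (base_score : Int) (hints_used : Int) (time_taken : Int) : Int :=
  let score := base_score
  let score := (PySem.List.pyRange 0 hints_used 1).foldl pvStepA score
  let score := if time_taken > 0 ∧ time_taken < 300 then score + 10 else score
  max score 0

-- ===== PORT B =====
def calculate_puzzle_score_alt (base_score : Int) (hints_used : Int) (time_taken : Int) : Int :=
  let k := max 0 hints_used
  let penalty := if k ≤ 5 then PySem.Int.floordiv (5 * k * (k + 1)) 2 else 75 + 30 * (k - 5)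
  let score := base_score - penalty
  let score := if 0 < time_taken ∧ time_taken < 300 then score + 10 else score
  max score 0

-- ===== PRECONDITION & SPEC =====
def Spec_calculate_puzzle_score (base_score : Int) (hints_used : Int) (time_taken : Int) (out : Int) : Prop := out = calculate_puzzle_score_alt base_score hints_used time_taken
instance (base_score : Int) (hints_used : Int) (time_taken : Int) (out : Int) : Decidable (Spec_calculate_puzzle_score base_score hints_used time_taken out) := by unfold Spec_calculate_puzzle_score; infer_instance

-- ===== CLAIM =====
def Claim_equal_calculate_puzzle_score : Prop := ∀ (base_score : Int) (hints_used : Int) (time_taken : Int), Dom_calculate_puzzle_score base_score hints_used time_taken → Spec_calculate_puzzle_score base_score hints_used time_taken (calculate_puzzle_score base_score hints_used time_taken)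

-- ===== LEMMAS AND PROOFS =====

-- A's penalty loop computes B's closed-form penalty.
lemma pv_loop_closed (n s : Int) :
    (PySem.List.pyRange 0 n 1).foldl pvStepA s
      = s - (if max 0 n ≤ 5 then PySem.Int.floordiv (5 * max 0 n * (max 0 n + 1)) 2
             else 75 + 30 * (max 0 n - 5)) := by
  rcases (by omega : n ≤ 0 ∨ 0 < n) with hn | hn
  · rw [PySem.List.pyRange_one_eq_nil hn]
    have : max 0 n = 0 := by omega
    simp [this, PySem.Int.floordiv]
  · rcases (by omega : n ≤ 5 ∨ 5 < n) with h5 | h5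
    · have hmax : max 0 n = n := by omega
      interval_cases n <;>
        (simp [PySem.List.pyRange_one, show Int.toNat 1 = 1 from rfl, show Int.toNat 2 = 2 from rfl, show Int.toNat 3 = 3 from rfl, show Int.toNat 4 = 4 from rfl, show Int.toNat 5 = 5 from rfl, show Int.toNat 6 = 6 from rfl, List.range_succ, pvStepA,
          pvHintPenalties, PySem.List.pyGetD, PySem.Int.floordiv,
          show Int.fdiv (10:Int) 2 = 5 from rfl, show Int.fdiv (30:Int) 2 = 15 from rfl,
          show Int.fdiv (60:Int) 2 = 30 from rfl, show Int.fdiv (100:Int) 2 = 50 from rfl,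
          show Int.fdiv (150:Int) 2 = 75 from rfl]; try omega)
    · have key : ∀ m : Int, 6 ≤ m →
          (PySem.List.pyRange 0 m 1).foldl pvStepA s = s - (75 + 30 * (m - 5)) := by
        intro m hm
        induction m, hm using Int.le_induction with
        | base =>
            simp [PySem.List.pyRange_one, show Int.toNat 1 = 1 from rfl, show Int.toNat 2 = 2 from rfl, show Int.toNat 3 = 3 from rfl, show Int.toNat 4 = 4 from rfl, show Int.toNat 5 = 5 from rfl, show Int.toNat 6 = 6 from rfl, List.range_succ, pvStepA,
              pvHintPenalties, PySem.List.pyGetD]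
            try omega
        | succ m hm ih =>
            rw [PySem.List.pyRange_one_succ_right (by omega : (0:Int) ≤ m),
              List.foldl_append, ih]
            have : ¬ m < (pvHintPenalties.length : Int) := by
              simp [pvHintPenalties]; omega
            simp [pvStepA, this]
            ring
      have hmax : max 0 n = n := by omega
      rw [key n (by omega), hmax]
      simp [show ¬ n ≤ 5 by omega]

-- ===== VERDICT =====
theorem calculate_puzzle_score_spec : Claim_equal_calculate_puzzle_score := by
  intro bs h t _
  unfold Spec_calculate_puzzle_score calculate_puzzle_score calculate_puzzle_score_alt
  simp only [pv_loop_closed]
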